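-- pv_equiv track=rewrite | github.com/AndreaNathansen/protein-prompt-tuning | activity_prediction_metrics/quality_checks.py | find_longest_repeat
-- ===== SOURCE A (Python) =====
-- def find_longest_repeat(seq, k):
--     longest = [1] * len(seq)
--     pattern = [None] * len(seq)
--
--     seq_len = len(seq)
--     for i in range(seq_len):
--         if i + k <= seq_len:
--             pattern[i] = seq[i:i+k]
--         if i - k >= 0:
--             if pattern[i-k] == pattern[i]:
--                 longest[i] = longest[i-k] + 1
--     return max(longest)
-- ===== SOURCE B (Python) =====
-- def find_longest_repeat(seq, k):
--     # O(n) single pass: count consecutive positions j with seq[j] == seq[j + k];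
--     # every k such matches complete one more adjacent equal k-mer in the current chain.
--     n = len(seq)
--     best = 1
--     blocks = 0  # completed k-blocks in the current match run
--     c = 0       # matches since the last completed block
--     for j in range(n - k):
--         if seq[j] == seq[j + k]:
--             c += 1
--             if c == k:
--                 blocks += 1
--                 c = 0
--                 best = max(best, blocks + 1)
--         else:
--             blocks = 0
--             c = 0
--     return best
-- ===== Notes on version B (the rewrite author's own statement) =====
-- stated objective: faster
-- what changed: Replaced the O(n*k) DP that builds and compares k-mer slices in pattern/longest arrays and takes max by a single O(n) pass counting consecutive positions with seq[j]==seq[j+k], completing one chained k-mer per k matches.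
-- intended difference: On k = 0 with non-empty seq, A returns 2 (pattern[i] compared with itself bumps longest[i] from its own leftover 1) while B returns 1, the intended answer for a degenerate k-mer size with no repeat. — e.g. on find_longest_repeat("a", 0): A returns 2, B returns 1
import Mathlib
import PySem

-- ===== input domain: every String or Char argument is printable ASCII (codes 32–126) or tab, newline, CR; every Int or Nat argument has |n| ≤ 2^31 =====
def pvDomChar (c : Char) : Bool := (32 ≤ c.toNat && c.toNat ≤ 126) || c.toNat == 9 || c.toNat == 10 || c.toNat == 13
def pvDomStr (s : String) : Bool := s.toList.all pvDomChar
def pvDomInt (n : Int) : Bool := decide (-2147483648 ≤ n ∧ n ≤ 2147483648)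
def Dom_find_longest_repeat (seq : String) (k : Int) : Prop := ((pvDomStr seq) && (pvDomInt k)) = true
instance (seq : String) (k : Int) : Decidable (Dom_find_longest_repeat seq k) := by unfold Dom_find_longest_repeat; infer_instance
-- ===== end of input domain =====

-- B replaces A's slice-comparing DP by a single faster pass counting consecutive seq[j]==seq[j+k]
-- matches; at k = 0 (D_ below) B returns 1 where A's 2 is an artefact.

-- ===== PORT A =====
-- the body of A's 'for i in range(seq_len)' loop, on state (longest, pattern)
def pyA_step (s : List Char) (k n : Int) (st : List Int × List (Option (List Char))) (i : Int) :
    List Int × List (Option (List Char)) :=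
  let pattern := if i + k ≤ n then PySem.List.pySetD st.2 i (some (PySem.List.slice s (some i) (some (i + k)))) else st.2
  let longest :=
    if 0 ≤ i - k then
      -- pattern[i-k]: an out-of-range index (possible only for k < 0) raises IndexError; Pre_ excludes it
      if PySem.List.pyGetD pattern (i - k) none = PySem.List.pyGetD pattern i none
      then PySem.List.pySetD st.1 i (PySem.List.pyGetD st.1 (i - k) 0 + 1)
      else st.1
    else st.1
  (longest, pattern)

def find_longest_repeat (seq : String) (k : Int) : Int :=
  let s := seq.toList
  let n : Int := (s.length : Int)
  let st := (PySem.List.pyRange 0 n 1).foldl (pyA_step s k n)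
    (List.replicate s.length (1 : Int), List.replicate s.length (none : Option (List Char)))
  -- max(longest) raises ValueError on an empty list; Pre_ excludes seq = ""
  (PySem.List.max? st.1 (fun x => x)).getD 0

-- ===== PORT B =====
-- the body of B's 'for j in range(n - k)' loop, on state (best, blocks, c)
def pyB_step (s : List Char) (k : Int) (st : Int × Int × Int) (j : Int) : Int × Int × Int :=
  if PySem.List.pyGetD s j ' ' = PySem.List.pyGetD s (j + k) ' '
  then
    if st.2.2 + 1 = k then (max st.1 (st.2.1 + 1 + 1), st.2.1 + 1, 0)
    else (st.1, st.2.1, st.2.2 + 1)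
  else (st.1, 0, 0)

def find_longest_repeat_alt (seq : String) (k : Int) : Int :=
  let s := seq.toList
  let n : Int := (s.length : Int)
  ((PySem.List.pyRange 0 (n - k) 1).foldl (pyB_step s k) (1, 0, 0)).1

-- ===== PRECONDITION & SPEC =====
-- Pre_ excludes exactly the inputs where A raises: seq = "" (ValueError at max([]))
-- and k < 0 (IndexError at pattern[i-k]).
def Pre_find_longest_repeat (seq : String) (k : Int) : Prop := seq.toList ≠ [] ∧ 0 ≤ k
instance (seq : String) (k : Int) : Decidable (Pre_find_longest_repeat seq k) := by
  unfold Pre_find_longest_repeat; infer_instance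

def pvWitness_find_longest_repeat : String × Int := ("abcabcab", 3)

-- On k = 0 (any non-empty seq) A returns 2 — an artefact of comparing pattern[i] with itself and
-- bumping longest[i] from its own leftover 1 — while B returns 1, the intended "no repeat" answer
-- for a degenerate k-mer size.
def D_find_longest_repeat (seq : String) (k : Int) : Prop := k = 0
instance (seq : String) (k : Int) : Decidable (D_find_longest_repeat seq k) := by
  unfold D_find_longest_repeat; infer_instance

def Spec_find_longest_repeat (seq : String) (k : Int) (out : Int) : Prop :=
  ¬ D_find_longest_repeat seq k → out = find_longest_repeat_alt seq k
instance (seq : String) (k : Int) (out : Int) : Decidable (Spec_find_longest_repeat seq k out) := by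
  unfold Spec_find_longest_repeat; infer_instance

def pvDiffWitness_find_longest_repeat : String × Int := ("a", 0)
def pvDiffWitnessOut_find_longest_repeat : Int × Int := (2, 1)

-- ===== CLAIM (what is proved, stated in full; the proofs are below) =====
def Claim_unchanged_find_longest_repeat : Prop := ∀ (seq : String) (k : Int), Dom_find_longest_repeat seq k → Pre_find_longest_repeat seq k → Spec_find_longest_repeat seq k (find_longest_repeat seq k)
def Claim_changed_find_longest_repeat : Prop := Dom_find_longest_repeat (pvDiffWitness_find_longest_repeat.1) (pvDiffWitness_find_longest_repeat.2) ∧ Pre_find_longest_repeat (pvDiffWitness_find_longest_repeat.1) (pvDiffWitness_find_longest_repeat.2) ∧ D_find_longest_repeat (pvDiffWitness_find_longest_repeat.1) (pvDiffWitness_find_longest_repeat.2) ∧ find_longest_repeat (pvDiffWitness_find_longest_repeat.1) (pvDiffWitness_find_longest_repeat.2) = pvDiffWitnessOut_find_longest_repeat.1 ∧ find_longest_repeat_alt (pvDiffWitness_find_longest_repeat.1) (pvDiffWitness_find_longest_repeat.2) = pvDiffWitnessOut_find_longest_repeat.2 ∧ pvDiffWitnessOut_find_longest_repeat.1 ≠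 pvDiffWitnessOut_find_longest_repeat.2
def Claim_exact_find_longest_repeat : Prop := ∀ (seq : String) (k : Int), Dom_find_longest_repeat seq k → Pre_find_longest_repeat seq k → D_find_longest_repeat seq k → find_longest_repeat seq k ≠ find_longest_repeat_alt seq k

-- ===== LEMMAS AND PROOFS =====

-- the k-mer at position i: pattern[i]'s final value
def patF (s : List Char) (K : Nat) (i : Nat) : Option (List Char) :=
  if i + K ≤ s.length then some ((s.drop i).take K) else none

-- longest[i]'s final value (A's DP, as a recursion on i with step K)
def chainF (s : List Char) (K : Nat) (i : Nat) : Nat :=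
  if h : 0 < K ∧ K ≤ i ∧ patF s K (i - K) = patF s K i
  then chainF s K (i - K) + 1
  else 1
termination_by i
decreasing_by omega

-- seq[j] == seq[j+k]
def eF (s : List Char) (K : Nat) (j : Nat) : Bool := decide (s.getD j ' ' = s.getD (j + K) ' ')

-- run length of True eF-values ending just before m
def runTo (s : List Char) (K : Nat) : Nat → Nat
  | 0 => 0
  | m + 1 => if eF s K m then runTo s K m + 1 else 0

-- running maximum of runTo i / K over i ≤ m (B's best, minus 1)
def MF (s : List Char) (K : Nat) : Nat → Nat
  | 0 => 0
  | m + 1 => max (MF s K m) (runTo s K (m + 1) / K)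

lemma runTo_le (s : List Char) (K : Nat) : ∀ m, runTo s K m ≤ m := by
  intro m
  induction m with
  | zero => simp [runTo]
  | succ m ih => simp only [runTo]; split <;> omega

lemma runTo_sub (s : List Char) (K : Nat) : ∀ t m, t ≤ runTo s K m → runTo s K (m - t) = runTo s K m - t := by
  intro t
  induction t with
  | zero => intro m _; simp
  | succ t ih =>
    intro m h
    match m with
    | 0 => simp [runTo] at h
    | m + 1 =>
      by_cases he : eF s K m
      · have h1 : runTo s K (m + 1) = runTo s K m + 1 := by simp [runTo, he]
        have h2 := ih m (by omega)
        have h3 : m + 1 - (t + 1) = m - t := by omega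
        rw [h3, h2]; omega
      · simp [runTo, he] at h

lemma eF_of_runTo (s : List Char) (K : Nat) : ∀ m j, m - runTo s K m ≤ j → j < m → eF s K j = true := by
  intro m
  induction m with
  | zero => omega
  | succ m ih =>
    intro j h1 h2
    by_cases he : eF s K m
    · have h1' : runTo s K (m + 1) = runTo s K m + 1 := by simp [runTo, he]
      by_cases hj : j = m
      · subst hj; exact he
      · exact ih j (by omega) (by omega)
    · have h0 : runTo s K (m + 1) = 0 := by simp [runTo, he]
      omega

lemma runTo_ge (s : List Char) (K : Nat) : ∀ t m, t ≤ m → (∀ j, m - t ≤ j → j < m → eF s K j = true) → t ≤ runTo s K m := by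
  intro t
  induction t with
  | zero => intro m _ _; omega
  | succ t ih =>
    intro m h hall
    match m with
    | 0 => omega
    | m + 1 =>
      have he : eF s K m = true := hall m (by omega) (by omega)
      have h1 : runTo s K (m + 1) = runTo s K m + 1 := by simp [runTo, he]
      have h2 := ih m (by omega) (fun j hj1 hj2 => hall j (by omega) (by omega))
      omega

-- slice equality is pointwise equality
lemma slice_eq_iff (s : List Char) (K a b : Nat) (ha : a + K ≤ s.length) (hb : b + K ≤ s.length) :
    ((s.drop a).take K = (s.drop b).take K) ↔ ∀ t, t < K → s.getD (a + t) ' ' = s.getD (b + t) ' ' := by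
  have la : ((s.drop a).take K).length = K := by
    simp [List.length_take, List.length_drop]; omega
  have lb : ((s.drop b).take K).length = K := by
    simp [List.length_take, List.length_drop]; omega
  have ga : ∀ t, t < K → ((s.drop a).take K).getD t ' ' = s.getD (a + t) ' ' := by
    intro t ht
    rw [List.getD_eq_getElem _ _ (by omega), List.getD_eq_getElem _ _ (by omega),
      List.getElem_take, List.getElem_drop]
  have gb : ∀ t, t < K → ((s.drop b).take K).getD t ' ' = s.getD (b + t) ' ' := by
    intro t ht
    rw [List.getD_eq_getElem _ _ (by omega), List.getD_eq_getElem _ _ (by omega),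
      List.getElem_take, List.getElem_drop]
  constructor
  · intro h t ht
    rw [← ga t ht, ← gb t ht, h]
  · intro h
    apply List.ext_getElem (by omega)
    intro t h1 h2
    have := h t (by omega)
    rw [← ga t (by omega), ← gb t (by omega)] at this
    rw [List.getD_eq_getElem _ _ h1, List.getD_eq_getElem _ _ h2] at this
    exact this

-- A's DP condition at i ≤ length - K is exactly "the e-run ending at i has length ≥ K"
lemma cond_iff (s : List Char) (K i : Nat) (hK : 1 ≤ K) (hi : i ≤ s.length - K) :
    (K ≤ i ∧ patF s K (i - K) = patF s K i) ↔ K ≤ runTo s K i := by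
  by_cases hKn : K ≤ s.length
  · have hiK : i + K ≤ s.length := by omega
    constructor
    · rintro ⟨hKi, hpat⟩
      have hp1 : patF s K (i - K) = some ((s.drop (i - K)).take K) := by
        simp [patF]; omega
      have hp2 : patF s K i = some ((s.drop i).take K) := by
        simp [patF, hiK]
      rw [hp1, hp2] at hpat
      have hpt := (slice_eq_iff s K (i - K) i (by omega) hiK).1 (Option.some_injective _ hpat)
      apply runTo_ge s K K i hKi
      intro j hj1 hj2
      have ht := hpt (j - (i - K)) (by omega)
      have e1 : i - K + (j - (i - K)) = j := by omega
      have e2 : i + (j - (i - K)) = j + K := by omega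
      rw [e1, e2] at ht
      simp only [eF, decide_eq_true_eq]
      exact ht
    · intro hr
      have hle := runTo_le s K i
      have hKi : K ≤ i := by omega
      have hall : ∀ j, i - K ≤ j → j < i → eF s K j = true := by
        intro j hj1 hj2
        exact eF_of_runTo s K i j (by omega) hj2
      refine ⟨hKi, ?_⟩
      have hp1 : patF s K (i - K) = some ((s.drop (i - K)).take K) := by
        simp [patF]; omega
      have hp2 : patF s K i = some ((s.drop i).take K) := by
        simp [patF, hiK]
      rw [hp1, hp2]
      congr 1
      apply (slice_eq_iff s K (i - K) i (by omega) hiK).2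
      intro t ht
      have := hall (i - K + t) (by omega) (by omega)
      simp only [eF, decide_eq_true_eq] at this
      have e2 : i - K + t + K = i + t := by omega
      rw [e2] at this
      exact this
  · have hi0 : i = 0 := by omega
    subst hi0
    exact ⟨fun h => absurd h.1 (by omega), fun h => absurd (le_trans h (runTo_le s K 0)) (by omega)⟩

lemma chain_eq (s : List Char) (K : Nat) (hK : 1 ≤ K) :
    ∀ i, i ≤ s.length - K → chainF s K i = runTo s K i / K + 1 := by
  intro i
  induction i using Nat.strong_induction_on with
  | _ i ih =>
    intro hi
    by_cases hr : K ≤ runTo s K i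
    · have hcond := (cond_iff s K i hK hi).2 hr
      rw [chainF, dif_pos ⟨by omega, hcond.1, hcond.2⟩]
      have hKi := hcond.1
      rw [ih (i - K) (by omega) (by omega)]
      rw [runTo_sub s K K i hr]
      conv_rhs => rw [show runTo s K i = (runTo s K i - K) + K from by omega]
      rw [Nat.add_div_right _ (by omega : 0 < K)]
    · rw [chainF, dif_neg]
      · have h0 : runTo s K i / K = 0 := Nat.div_eq_of_lt (by omega)
        omega
      · rintro ⟨h1, h2, h3⟩
        exact hr ((cond_iff s K i hK hi).1 ⟨h2, h3⟩)

lemma chain_one (s : List Char) (K i : Nat) (hi : i < s.length) (hL : s.length - K < i) :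
    chainF s K i = 1 := by
  rw [chainF, dif_neg]
  rintro ⟨h0, hKi, hpat⟩
  by_cases hKn : K ≤ s.length
  · have hp1 : patF s K (i - K) = some ((s.drop (i - K)).take K) := by
      simp [patF]; omega
    have hp2 : patF s K i = none := by
      simp [patF]; omega
    rw [hp1, hp2] at hpat
    exact Option.some_ne_none _ hpat
  · omega

lemma term_le_MF (s : List Char) (K : Nat) : ∀ m i, i ≤ m → runTo s K i / K ≤ MF s K m := by
  intro m
  induction m with
  | zero => intro i hi; interval_cases i; simp [MF, runTo]
  | succ m ih =>
    intro i hi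
    by_cases h : i = m + 1
    · subst h; simp [MF]
    · exact le_trans (ih i (by omega)) (by simp [MF])

lemma MF_attained (s : List Char) (K : Nat) : ∀ m, ∃ i, i ≤ m ∧ runTo s K i / K = MF s K m := by
  intro m
  induction m with
  | zero => exact ⟨0, le_refl 0, by simp [MF, runTo]⟩
  | succ m ih =>
    obtain ⟨i, hi, heq⟩ := ih
    by_cases h : runTo s K (m + 1) / K ≤ MF s K m
    · exact ⟨i, by omega, by simp [MF]; omega⟩
    · exact ⟨m + 1, le_refl _, by simp [MF]; omega⟩


-- setting index m turns "final values below m" into "final values below m+1"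
lemma map_range_step {α : Type} (n m : Nat) (f : Nat → α) (d : α) (v : α) (hv : v = f m) :
    ((List.range n).map (fun i => if i < m then f i else d)).set m v
      = (List.range n).map (fun i => if i < m + 1 then f i else d) := by
  apply List.ext_getElem (by simp)
  intro j hj1 hj2
  simp only [List.length_set, List.length_map, List.length_range] at hj1
  rw [List.getElem_set]
  simp only [List.getElem_map, List.getElem_range]
  by_cases hj : m = j
  · subst hj; simp [hv]
  · rw [if_neg hj]
    split_ifs <;> first | rfl | omega

lemma map_range_stay {α : Type} (n m : Nat) (f : Nat → α) (d : α) (hd : f m = d) :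
    (List.range n).map (fun i => if i < m then f i else d)
      = (List.range n).map (fun i => if i < m + 1 then f i else d) := by
  apply List.map_congr_left
  intro i _
  by_cases hi : i = m
  · subst hi; simp [hd]
  · split_ifs <;> first | rfl | omega

-- A's loop invariant
lemma A_inv (s : List Char) (K : Nat) (hK : 1 ≤ K) :
    ∀ m, m ≤ s.length →
      (PySem.List.pyRange 0 (m : Int) 1).foldl (pyA_step s (K : Int) (s.length : Int))
        (List.replicate s.length (1 : Int), List.replicate s.length (none : Option (List Char)))
      = ((List.range s.length).map (fun i => if i < m then (chainF s K i : Int) else 1),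
         (List.range s.length).map (fun i => if i < m then patF s K i else none)) := by
  intro m
  induction m with
  | zero =>
    intro _
    rw [PySem.List.pyRange_one_eq_nil (by omega)]
    simp [List.foldl_nil, List.map_const']
  | succ m ih =>
    intro h
    have hcast : ((m + 1 : Nat) : Int) = (m : Int) + 1 := by push_cast; ring
    rw [hcast, PySem.List.pyRange_one_succ_right (by positivity), List.foldl_append, ih (by omega)]
    simp only [List.foldl_cons, List.foldl_nil, pyA_step]
    have hpat : (if (m : Int) + (K : Int) ≤ (s.length : Int) then
          PySem.List.pySetD ((List.range s.length).map (fun i => if i < m then patF s K i else none))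
            (m : Int) (some (PySem.List.slice s (some (m : Int)) (some ((m : Int) + (K : Int)))))
        else (List.range s.length).map (fun i => if i < m then patF s K i else none))
        = (List.range s.length).map (fun i => if i < m + 1 then patF s K i else none) := by
      by_cases hg : m + K ≤ s.length
      · rw [if_pos (by exact_mod_cast hg), PySem.List.slice_natCast_add s m K,
          PySem.List.pySetD_natCast]
        exact map_range_step _ _ _ _ _ (by simp [patF, hg])
      · rw [if_neg (by exact_mod_cast hg)]
        exact map_range_stay _ _ _ _ (by simp [patF]; omega)
    rw [hpat]
    have hlong : (if 0 ≤ (m : Int) - (K : Int) then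
          (if PySem.List.pyGetD ((List.range s.length).map (fun i => if i < m + 1 then patF s K i else none)) ((m : Int) - (K : Int)) none
              = PySem.List.pyGetD ((List.range s.length).map (fun i => if i < m + 1 then patF s K i else none)) (m : Int) none
           then PySem.List.pySetD ((List.range s.length).map (fun i => if i < m then (chainF s K i : Int) else 1))
              (m : Int) (PySem.List.pyGetD ((List.range s.length).map (fun i => if i < m then (chainF s K i : Int) else 1)) ((m : Int) - (K : Int)) 0 + 1)
           else (List.range s.length).map (fun i => if i < m then (chainF s K i : Int) else 1))
        else (List.range s.length).map (fun i => if i < m then (chainF s K i : Int) else 1))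
        = (List.range s.length).map (fun i => if i < m + 1 then (chainF s K i : Int) else 1) := by
      by_cases hKm : K ≤ m
      · rw [if_pos (by omega)]
        have hidx : (m : Int) - (K : Int) = ((m - K : Nat) : Int) := by push_cast [hKm]; ring
        rw [hidx, PySem.List.pyGetD_natCast, PySem.List.pyGetD_natCast, PySem.List.pyGetD_natCast,
          PySem.List.getD_map_range _ _ _ _ (by omega), PySem.List.getD_map_range _ _ _ _ (by omega),
          PySem.List.getD_map_range _ _ _ _ (by omega)]
        rw [if_pos (by omega : m - K < m + 1), if_pos (by omega : m < m + 1), if_pos (by omega : m - K < m)]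
        by_cases hpq : patF s K (m - K) = patF s K m
        · rw [if_pos hpq, PySem.List.pySetD_natCast]
          apply map_range_step
          conv_rhs => rw [chainF]
          rw [dif_pos ⟨by omega, hKm, hpq⟩]
          push_cast; ring
        · rw [if_neg hpq]
          apply map_range_stay
          conv_lhs => rw [chainF]
          rw [dif_neg (by rintro ⟨-, -, h3⟩; exact hpq h3)]
          norm_num
      · rw [if_neg (by omega)]
        apply map_range_stay
        conv_lhs => rw [chainF]
        rw [dif_neg (by rintro ⟨-, h2, -⟩; omega)]
        norm_num
    rw [hlong]

-- B's loop invariant: best/blocks/c track MF, runTo/K and runTo%K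
lemma B_inv (s : List Char) (K : Nat) (hK : 1 ≤ K) :
    ∀ m, (List.range m).foldl (fun st j => pyB_step s (K : Int) st ((j : Nat) : Int)) ((1 : Int), (0 : Int), (0 : Int))
      = (1 + (MF s K m : Int), ((runTo s K m / K : Nat) : Int), ((runTo s K m % K : Nat) : Int)) := by
  intro m
  induction m with
  | zero => simp [MF, runTo]
  | succ m ih =>
    rw [List.range_succ, List.foldl_append, ih]
    simp only [List.foldl_cons, List.foldl_nil, pyB_step, ← Nat.cast_add, PySem.List.pyGetD_natCast]
    have hK0 : 0 < K := by omega
    have hdm := Nat.div_add_mod (runTo s K m) K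
    have hmlt : runTo s K m % K < K := Nat.mod_lt _ hK0
    split_ifs with hc hck
    · simp only [List.getD_eq_getElem?_getD] at hc
      have hr : runTo s K (m + 1) = runTo s K m + 1 := by
        simp [runTo, eF, List.getD_eq_getElem?_getD, hc]
      have hck' : runTo s K m % K + 1 = K := by exact_mod_cast hck
      have he : runTo s K m + 1 = K * (runTo s K m / K + 1) := by
        rw [Nat.mul_add, Nat.mul_one]; omega
      have hdiv : runTo s K (m + 1) / K = runTo s K m / K + 1 := by
        rw [hr, he, Nat.mul_div_cancel_left _ hK0]
      have hmod : runTo s K (m + 1) % K = 0 := by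
        rw [hr, he, Nat.mul_mod_right]
      have hM : MF s K (m + 1) = max (MF s K m) (runTo s K (m + 1) / K) := rfl
      rw [hdiv] at hM
      rw [hdiv, hmod, hM]
      simp only [Prod.mk.injEq]
      refine ⟨?_, ?_, by simp⟩ <;> push_cast [Nat.cast_max] <;> omega
    · simp only [List.getD_eq_getElem?_getD] at hc
      have hr : runTo s K (m + 1) = runTo s K m + 1 := by
        simp [runTo, eF, List.getD_eq_getElem?_getD, hc]
      have hne : runTo s K m % K + 1 ≠ K := fun h => hck (by exact_mod_cast h)
      have hlt : runTo s K m % K + 1 < K := by omega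
      have he : runTo s K m + 1 = K * (runTo s K m / K) + (runTo s K m % K + 1) := by omega
      have hdiv : runTo s K (m + 1) / K = runTo s K m / K := by
        rw [hr, he, Nat.mul_add_div hK0, Nat.div_eq_of_lt hlt, Nat.add_zero]
      have hmod : runTo s K (m + 1) % K = runTo s K m % K + 1 := by
        rw [hr, he, Nat.mul_add_mod, Nat.mod_eq_of_lt hlt]
      have hM : MF s K (m + 1) = max (MF s K m) (runTo s K (m + 1) / K) := rfl
      rw [hdiv] at hM
      have hle : runTo s K m / K ≤ MF s K m := term_le_MF s K m m (le_refl m)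
      have hMM : MF s K (m + 1) = MF s K m := by rw [hM]; omega
      rw [hdiv, hmod, hMM]
      simp only [Prod.mk.injEq]
      refine ⟨trivial, trivial, by push_cast; ring⟩
    · simp only [List.getD_eq_getElem?_getD] at hc
      have hr : runTo s K (m + 1) = 0 := by
        simp [runTo, eF, List.getD_eq_getElem?_getD, hc]
      have hM : MF s K (m + 1) = max (MF s K m) (runTo s K (m + 1) / K) := rfl
      rw [hr] at hM
      simp [hr, hM, Nat.zero_div]

-- at k = 0 A's loop sets every longest[i] to 2 and every pattern[i] to the empty slice
lemma A0_inv (s : List Char) :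
    ∀ m, m ≤ s.length →
      (PySem.List.pyRange 0 (m : Int) 1).foldl (pyA_step s 0 (s.length : Int))
        (List.replicate s.length (1 : Int), List.replicate s.length (none : Option (List Char)))
      = ((List.range s.length).map (fun i => if i < m then (2 : Int) else 1),
         (List.range s.length).map (fun i => if i < m then some ([] : List Char) else none)) := by
  intro m
  induction m with
  | zero =>
    intro _
    rw [PySem.List.pyRange_one_eq_nil (by omega)]
    simp [List.foldl_nil, List.map_const']
  | succ m ih =>
    intro h
    have hcast : ((m + 1 : Nat) : Int) = (m : Int) + 1 := by push_cast; ring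
    rw [hcast, PySem.List.pyRange_one_succ_right (by positivity), List.foldl_append, ih (by omega)]
    simp only [List.foldl_cons, List.foldl_nil, pyA_step]
    rw [if_pos (by omega : (m : Int) + 0 ≤ (s.length : Int))]
    rw [show ((m : Int) + 0) = ((m : Int) + ((0 : Nat) : Int)) from by norm_num,
      PySem.List.slice_natCast_add s m 0, List.take_zero, PySem.List.pySetD_natCast]
    rw [map_range_step s.length m _ _ _ rfl]
    rw [if_pos (by omega : (0 : Int) ≤ (m : Int) - 0)]
    rw [show ((m : Int) - 0) = ((m : Int)) from by ring]
    rw [if_pos rfl]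
    rw [PySem.List.pyGetD_natCast, PySem.List.getD_map_range _ _ _ _ (by omega),
      if_neg (by omega : ¬ m < m), PySem.List.pySetD_natCast]
    rw [map_range_step s.length m _ _ _ (by norm_num)]

-- at k = 0 B's loop never completes a block: the state stays (1, 0, j)
lemma B0_inv (s : List Char) :
    ∀ m, (List.range m).foldl (fun st j => pyB_step s 0 st ((j : Nat) : Int)) ((1 : Int), (0 : Int), (0 : Int))
      = (1, 0, (m : Int)) := by
  intro m
  induction m with
  | zero => simp
  | succ m ih =>
    rw [List.range_succ, List.foldl_append, ih]
    simp only [List.foldl_cons, List.foldl_nil, pyB_step]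
    rw [show (((m : Nat) : Int) + 0) = ((m : Nat) : Int) from by ring]
    rw [if_pos rfl, if_neg (by omega : ¬ (((m : Nat) : Int) + 1 = 0))]
    simp only [Prod.mk.injEq]
    refine ⟨trivial, trivial, by push_cast; ring⟩

lemma A_at_zero (seq : String) (hne : seq.toList ≠ []) : find_longest_repeat seq 0 = 2 := by
  simp only [find_longest_repeat]
  rw [A0_inv seq.toList seq.toList.length (le_refl _)]
  have hn : 0 < seq.toList.length := List.length_pos_iff.mpr hne
  have hLn : (List.range seq.toList.length).map (fun i => if i < seq.toList.length then (2 : Int) else 1)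
      = (List.range seq.toList.length).map (fun _ => (2 : Int)) :=
    List.map_congr_left (fun i hi => by rw [if_pos (List.mem_range.mp hi)])
  rw [hLn]
  cases hmax : PySem.List.max? ((List.range seq.toList.length).map (fun _ => (2 : Int))) (fun x => x) with
  | none =>
    exfalso
    have hxs := (PySem.List.max?_eq_none_iff _ _).1 hmax
    have hlen : seq.toList.length = 0 := by simpa using congrArg List.length hxs
    omega
  | some r =>
    obtain ⟨i, hi, hri⟩ := List.mem_map.mp (PySem.List.max?_mem hmax)
    simp [← hri]

lemma B_at_zero (seq : String) : find_longest_repeat_alt seq 0 = 1 := by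
  simp only [find_longest_repeat_alt]
  have hrange : PySem.List.pyRange 0 ((seq.toList.length : Int) - 0) 1
      = (List.range seq.toList.length).map (fun t : Nat => ((0 : Int) + (t : Int))) := by
    have h0 : ((seq.toList.length : Int) - 0 - 0).toNat = seq.toList.length := by simp
    rw [PySem.List.pyRange_one, h0]
  rw [hrange, List.foldl_map]
  simp only [zero_add]
  rw [B0_inv seq.toList seq.toList.length]

-- the value A's max(longest) computes, given the two characterizations

lemma max_chain (s : List Char) (K : Nat) (hK : 1 ≤ K) (hn : 0 < s.length) :
    (PySem.List.max? ((List.range s.length).map (fun i => (chainF s K i : Int))) (fun x => x)).getD 0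
      = 1 + (MF s K (s.length - K) : Int) := by
  cases hmax : PySem.List.max? ((List.range s.length).map (fun i => (chainF s K i : Int))) (fun x => x) with
  | none =>
    exfalso
    have hxs := (PySem.List.max?_eq_none_iff _ _).1 hmax
    have hlen : s.length = 0 := by simpa using congrArg List.length hxs
    omega
  | some r =>
    have hmem := PySem.List.max?_mem hmax
    have hub := PySem.List.max?_isMax hmax
    obtain ⟨i, hi, hri⟩ := List.mem_map.mp hmem
    have hilen : i < s.length := List.mem_range.mp hi
    have hbound : (chainF s K i : Int) ≤ (MF s K (s.length - K) : Int) + 1 := by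
      by_cases hiL : i ≤ s.length - K
      · rw [chain_eq s K hK i hiL]
        have := term_le_MF s K (s.length - K) i hiL
        push_cast
        omega
      · rw [chain_one s K i hilen (by omega)]
        push_cast
        omega
    obtain ⟨i0, hi0, heq⟩ := MF_attained s K (s.length - K)
    have hi0len : i0 < s.length := by omega
    have hmem0 : ((MF s K (s.length - K) : Int) + 1) ∈ (List.range s.length).map (fun i => (chainF s K i : Int)) :=
      List.mem_map.mpr ⟨i0, List.mem_range.mpr hi0len, by rw [chain_eq s K hK i0 hi0, heq]; push_cast; ring⟩
    have hge := hub _ hmem0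
    rw [Option.getD_some]
    rw [← hri] at hge ⊢
    omega

-- ===== VERDICT (by name: the statements are the Claim_ definitions above) =====
theorem find_longest_repeat_spec : Claim_unchanged_find_longest_repeat := by
  intro seq k _ hpre hnd
  obtain ⟨hne, hk0⟩ := hpre
  have hk1 : 1 ≤ k := by
    simp only [D_find_longest_repeat] at hnd
    omega
  simp only [find_longest_repeat, find_longest_repeat_alt]
  have hKcast : k = ((k.toNat : Nat) : Int) := (Int.toNat_of_nonneg (by omega)).symm
  set s := seq.toList with hs
  set K := k.toNat with hKdef
  have hK1 : 1 ≤ K := by omega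
  have hn : 0 < s.length := List.length_pos_iff.mpr hne
  rw [hKcast]
  -- A side: the loop invariant at m = s.length, then drop the vacuous "i < length" test
  rw [A_inv s K hK1 s.length (le_refl _)]
  have hLn : (List.range s.length).map (fun i => if i < s.length then (chainF s K i : Int) else 1)
      = (List.range s.length).map (fun i => (chainF s K i : Int)) :=
    List.map_congr_left (fun i hi => by rw [if_pos (List.mem_range.mp hi)])
  rw [hLn, max_chain s K hK1 hn]
  -- B side: the range is List.range (s.length - K), then the loop invariant
  have hrange : PySem.List.pyRange 0 ((s.length : Int) - (K : Int)) 1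
      = (List.range (s.length - K)).map (fun t : Nat => ((0 : Int) + (t : Int))) := by
    have h0 : ((s.length : Int) - (K : Int) - 0).toNat = s.length - K := by
      rw [Int.sub_zero, Int.toNat_sub]
    rw [PySem.List.pyRange_one, h0]
  rw [hrange, List.foldl_map]
  simp only [zero_add]
  rw [B_inv s K hK1 (s.length - K)]

theorem find_longest_repeat_changed : Claim_changed_find_longest_repeat := by
  unfold Claim_changed_find_longest_repeat
  decide

theorem find_longest_repeat_tight : Claim_exact_find_longest_repeat := by
  intro seq k _ hpre hd
  obtain ⟨hne, -⟩ := hpre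
  simp only [D_find_longest_repeat] at hd
  subst hd
  rw [A_at_zero seq hne, B_at_zero seq]
  decide
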